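-- pv_equiv track=rewrite | github.com/paiml/depyler | examples/hard_dict_merge_deep.py | merge_prefer_right
-- ===== SOURCE A (Python) =====
-- def merge_prefer_right(a: dict[str, int], b: dict[str, int], all_keys: list[str]) -> dict[str, int]:
--     result: dict[str, int] = {}
--     i: int = 0
--     while i < len(all_keys):
--         ak: str = all_keys[i]
--         if ak in b:
--             result[ak] = b[ak]
--         elif ak in a:
--             result[ak] = a[ak]
--         i = i + 1
--     return result
-- ===== SOURCE B (Python) =====
-- def merge_prefer_right(a, b, all_keys):
--     # Stage 1: index each key by its first position in all_keys.
--     pos = {}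
--     for i, k in enumerate(all_keys):
--         if k not in pos:
--             pos[k] = i
--     # Stage 2: scan the two dicts (not the key list), keeping entries whose key
--     # occurs in all_keys; b's pass overwrites a's, giving right preference.
--     cand = {}
--     for k, v in a.items():
--         if k in pos:
--             cand[k] = v
--     for k, v in b.items():
--         if k in pos:
--             cand[k] = v
--     # Stage 3: order the surviving entries by first occurrence in all_keys.
--     return dict(sorted(cand.items(), key=lambda kv: pos[kv[0]]))
-- ===== Notes on version B (the rewrite author's own statement) =====
-- stated objective: alternative
-- what changed: Instead of A's single walk over all_keys testing each key against b then a, B indexes all_keys by first position, scans the items of a and b (not the key list) to collect the surviving entries with right preference, and finally sorts those entries by their first-occurrence index to restore key order.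
import Mathlib
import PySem

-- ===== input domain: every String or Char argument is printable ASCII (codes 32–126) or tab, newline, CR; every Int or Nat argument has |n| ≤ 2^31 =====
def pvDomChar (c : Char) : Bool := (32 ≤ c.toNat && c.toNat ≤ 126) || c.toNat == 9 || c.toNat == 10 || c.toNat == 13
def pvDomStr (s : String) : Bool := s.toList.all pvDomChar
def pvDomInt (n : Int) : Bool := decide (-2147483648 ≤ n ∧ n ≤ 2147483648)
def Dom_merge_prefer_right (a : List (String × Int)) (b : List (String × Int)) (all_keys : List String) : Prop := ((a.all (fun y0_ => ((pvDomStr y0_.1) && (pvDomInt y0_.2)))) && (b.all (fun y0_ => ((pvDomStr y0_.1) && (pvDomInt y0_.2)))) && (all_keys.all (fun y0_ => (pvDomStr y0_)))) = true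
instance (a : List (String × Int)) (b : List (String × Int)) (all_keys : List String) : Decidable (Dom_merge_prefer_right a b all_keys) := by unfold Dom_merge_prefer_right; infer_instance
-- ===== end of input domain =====

-- B replaces A's single walk over all_keys (two membership tests per key) by three staged passes:
-- index all_keys by first position, scan a's and b's items keeping keys that occur in all_keys
-- (b's pass overwrites a's), then sort the survivors by first-occurrence index (objective: alternative).

-- ===== PORT A =====
-- A's while-loop over all_keys indices, testing 'ak in b' then 'ak in a', becomes a foldl over all_keys.
def merge_prefer_right (a : List (String × Int)) (b : List (String × Int)) (all_keys : List String) : List (String × Int) :=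
  let da : PySem.Dict String Int := PySem.Dict.mk a
  let db : PySem.Dict String Int := PySem.Dict.mk b
  (all_keys.foldl (fun result ak =>
      if db.contains ak then result.insert ak (db.getD ak 0)
      else if da.contains ak then result.insert ak (da.getD ak 0)
      else result)
    PySem.Dict.empty).items

-- ===== PORT B =====
-- Stage 1: pos = first index of each key in all_keys; Stage 2: scan a's then b's items,
-- keeping keys present in pos; Stage 3: sort survivors by pos and rebuild the dict.
-- (In 'key=lambda kv: pos[kv[0]]' the key is always present in pos, so getD with default 0 is exact.)
def merge_prefer_right_alt (a : List (String × Int)) (b : List (String × Int)) (all_keys : List String) : List (String × Int) :=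
  let pos : PySem.Dict String Int :=
    (PySem.List.enumerate all_keys 0).foldl
      (fun d p => if d.contains p.2 then d else d.insert p.2 p.1) PySem.Dict.empty
  let cand1 : PySem.Dict String Int :=
    a.foldl (fun d p => if pos.contains p.1 then d.insert p.1 p.2 else d) PySem.Dict.empty
  let cand : PySem.Dict String Int :=
    b.foldl (fun d p => if pos.contains p.1 then d.insert p.1 p.2 else d) cand1
  (PySem.Dict.ofList (PySem.List.sorted cand.items (fun kv => pos.getD kv.1 0))).items

-- ===== PRECONDITION & SPEC =====
-- Pre_ excludes association lists whose keys repeat: a Python dict argument can never contain a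
-- duplicate key, and on such non-dict encodings first-match lookup vs overwrite-on-insert are
-- both defensible accidents of the encoding.
def Pre_merge_prefer_right (a : List (String × Int)) (b : List (String × Int)) (all_keys : List String) : Prop :=
  (a.map Prod.fst).Nodup ∧ (b.map Prod.fst).Nodup
instance (a : List (String × Int)) (b : List (String × Int)) (all_keys : List String) : Decidable (Pre_merge_prefer_right a b all_keys) := by unfold Pre_merge_prefer_right; infer_instance

def pvWitness_merge_prefer_right : (List (String × Int)) × (List (String × Int)) × List String :=
  ([("x", 1)], [("x", 2), ("y", 3)], ["x", "y", "z"])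

def Spec_merge_prefer_right (a : List (String × Int)) (b : List (String × Int)) (all_keys : List String) (out : List (String × Int)) : Prop := out = merge_prefer_right_alt a b all_keys
instance (a : List (String × Int)) (b : List (String × Int)) (all_keys : List String) (out : List (String × Int)) : Decidable (Spec_merge_prefer_right a b all_keys out) := by unfold Spec_merge_prefer_right; infer_instance

-- ===== CLAIM (what is proved, stated in full; the proofs are below) =====
def Claim_equal_merge_prefer_right : Prop := ∀ (a : List (String × Int)) (b : List (String × Int)) (all_keys : List String), Dom_merge_prefer_right a b all_keys → Pre_merge_prefer_right a b all_keys → Spec_merge_prefer_right a b all_keys (merge_prefer_right a b all_keys)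

-- ===== LEMMAS AND PROOFS =====

-- Keys of a list in order of FIRST occurrence (proof-side reference object).
def pvFirstOccs : List String → List String
  | [] => []
  | k :: rest => k :: (pvFirstOccs rest).filter (fun x => x != k)

-- Reference value both ports are proved equal to: first occurrences of all_keys,
-- each paired with its b-preferring value when present in b or a.
def pvRef (a b : List (String × Int)) (all_keys : List String) : List (String × Int) :=
  (pvFirstOccs all_keys).filterMap (fun k =>
    (((PySem.Dict.mk b).get? k).or ((PySem.Dict.mk a).get? k)).map (fun v => (k, v)))

theorem pv_mem_firstOccs (x : String) (l : List String) : x ∈ pvFirstOccs l ↔ x ∈ l := by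
  induction l with
  | nil => simp [pvFirstOccs]
  | cons k rest ih =>
    simp only [pvFirstOccs, List.mem_cons, List.mem_filter, bne_iff_ne]
    constructor
    · rintro (h | ⟨h, _⟩)
      · exact Or.inl h
      · exact Or.inr (ih.mp h)
    · rintro (h | h)
      · exact Or.inl h
      · by_cases hx : x = k
        · exact Or.inl hx
        · exact Or.inr ⟨ih.mpr h, hx⟩

theorem pv_nodup_firstOccs (l : List String) : (pvFirstOccs l).Nodup := by
  induction l with
  | nil => simp [pvFirstOccs]
  | cons k rest ih =>
    refine List.Nodup.cons ?_ (ih.filter _)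
    intro hmem
    rcases List.mem_filter.mp hmem with ⟨_, h2⟩
    simp at h2

theorem pv_firstOccs_filter (p : String → Bool) (l : List String) :
    pvFirstOccs (l.filter p) = (pvFirstOccs l).filter p := by
  induction l with
  | nil => rfl
  | cons x rest ih =>
    by_cases hx : p x = true
    · rw [List.filter_cons, if_pos hx]
      simp only [pvFirstOccs, ih, List.filter_cons, if_pos hx, List.filter_filter]
      congr 1
      exact List.filter_congr (fun y _ => Bool.and_comm _ _)
    · rw [List.filter_cons, if_neg hx]
      simp only [pvFirstOccs, ih, List.filter_cons, if_neg hx, List.filter_filter]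
      exact List.filter_congr (fun y _ => by
        by_cases hy : y = x
        · subst hy
          have hx' : p y = false := by simpa using hx
          simp [hx']
        · simp [hy])

theorem pv_filterMap_filter_ne {β : Type} (fm : String → Option β) (k : String)
    (h : fm k = none) (ys : List String) :
    (ys.filter (fun x => x != k)).filterMap fm = ys.filterMap fm := by
  induction ys with
  | nil => rfl
  | cons y rest ih =>
    by_cases hy : y = k
    · subst hy; simp [List.filter_cons, h, ih]
    · simp [List.filter_cons, hy, List.filterMap_cons, ih]

theorem pv_firstOccs_pairwise (l : List String) :
    (pvFirstOccs l).Pairwise (fun x y => l.idxOf x < l.idxOf y) := by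
  induction l with
  | nil => simp [pvFirstOccs]
  | cons k rest ih =>
    refine List.Pairwise.cons ?_ ?_
    · intro y hy
      rcases List.mem_filter.mp hy with ⟨_, h2⟩
      have hyk : y ≠ k := by simpa using h2
      rw [List.idxOf_cons_self, List.idxOf_cons_ne _ (Ne.symm hyk)]
      omega
    · refine (List.pairwise_filter.mpr (ih.imp_of_mem ?_))
      intro x y _ _ hlt hxk hyk
      have hx : x ≠ k := by simpa using hxk
      have hy : y ≠ k := by simpa using hyk
      rw [List.idxOf_cons_ne _ (Ne.symm hx), List.idxOf_cons_ne _ (Ne.symm hy)]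
      omega

-- Re-inserting a key with the value it already has leaves the items untouched.
theorem pv_items_insert_same (d : PySem.Dict String Int) (k : String) (v : Int)
    (hn : d.keys.Nodup) (h : d.get? k = some v) : (d.insert k v).items = d.items := by
  have hc : d.contains k = true := by rw [PySem.Dict.contains_eq_isSome_get?, h]; rfl
  rw [PySem.Dict.items_insert_of_contains _ _ hc]
  have : ∀ p ∈ d.items, (if (p.1 == k) = true then (k, v) else p) = p := by
    intro p hp
    by_cases hpk : p.1 = k
    · have hp' : (p.1, p.2) ∈ d.items := by simpa using hp
      have this := PySem.Dict.get?_of_mem_items d hp' hn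
      rw [hpk, h] at this
      have hv : p.2 = v := by injection this.symm
      rw [if_pos (by simp [hpk]), ← hpk, ← hv]
    · simp [hpk]
  rw [List.map_congr_left this]
  simp

-- A's loop, characterised: starting from d whose entries already agree with the b-over-a
-- lookup, the items grow by the first occurrences of the fresh keys that b or a contains.
theorem pv_foldA (da db : PySem.Dict String Int) (l : List String) (d : PySem.Dict String Int)
    (hn : d.keys.Nodup)
    (hinv : ∀ k v, d.get? k = some v → (db.get? k).or (da.get? k) = some v) :
    (l.foldl (fun r k =>
        if db.contains k then r.insert k (db.getD k 0)
        else if da.contains k then r.insert k (da.getD k 0)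
        else r) d).items
    = d.items ++ (pvFirstOccs (l.filter (fun k => !d.contains k))).filterMap
        (fun k => ((db.get? k).or (da.get? k)).map (fun v => (k, v))) := by
  induction l generalizing d with
  | nil => simp [pvFirstOccs]
  | cons k rest ih =>
    by_cases hc : d.contains k = true
    · -- k already recorded: the step re-inserts the same value; nothing changes.
      obtain ⟨w, hw⟩ : ∃ w, d.get? k = some w := by
        have := PySem.Dict.contains_eq_isSome_get? d k
        rw [hc] at this
        exact Option.isSome_iff_exists.mp this.symm
      have hf := hinv k w hw
      have hstep : (if db.contains k then d.insert k (db.getD k 0)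
          else if da.contains k then d.insert k (da.getD k 0) else d) = d.insert k w := by
        cases hb : db.get? k with
        | some v =>
          have hcb : db.contains k = true := by
            rw [PySem.Dict.contains_eq_isSome_get?, hb]; rfl
          rw [hb] at hf
          have : v = w := by simpa using hf
          simp [hcb, PySem.Dict.getD_eq_get?_getD, hb, this]
        | none =>
          have hcb : db.contains k = false := by
            rw [PySem.Dict.contains_eq_isSome_get?, hb]; rfl
          rw [hb, Option.none_or] at hf
          have hca : da.contains k = true := by
            rw [PySem.Dict.contains_eq_isSome_get?, hf]; rfl
          simp [hcb, hca, PySem.Dict.getD_eq_get?_getD, hf]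
      have hget : ∀ k', (d.insert k w).get? k' = d.get? k' := by
        intro k'
        rw [PySem.Dict.get?_insert]
        split
        · next heq => rw [heq, hw]
        · rfl
      have hcont : ∀ k', (d.insert k w).contains k' = d.contains k' := by
        intro k'
        rw [PySem.Dict.contains_eq_isSome_get?, PySem.Dict.contains_eq_isSome_get?, hget]
      have hkeys : (d.insert k w).keys = d.keys := PySem.Dict.keys_insert_of_contains _ _ hc
      simp only [List.foldl_cons, hstep]
      rw [ih (d.insert k w) (by rw [hkeys]; exact hn)
        (fun k' v' hv' => hinv k' v' (by rw [← hget]; exact hv'))]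
      rw [pv_items_insert_same d k w hn hw]
      have hfe : rest.filter (fun x => !(d.insert k w).contains x)
          = (k :: rest).filter (fun x => !d.contains x) := by
        rw [List.filter_cons, if_neg (by rw [hc]; simp)]
        exact List.filter_congr (fun x _ => by rw [hcont])
      rw [hfe]
    · -- k is fresh here
      have hcf : d.contains k = false := by simpa using hc
      have hgk : d.get? k = none := by
        have := PySem.Dict.contains_eq_isSome_get? d k
        rw [hcf] at this
        exact Option.not_isSome_iff_eq_none.mp (by rw [← this]; simp)
      cases hfk : (db.get? k).or (da.get? k) with
      | some v =>
        -- the step appends (k, v)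
        have hstep : (if db.contains k then d.insert k (db.getD k 0)
            else if da.contains k then d.insert k (da.getD k 0) else d) = d.insert k v := by
          cases hb : db.get? k with
          | some w =>
            have hcb : db.contains k = true := by
              rw [PySem.Dict.contains_eq_isSome_get?, hb]; rfl
            rw [hb] at hfk
            have : w = v := by simpa using hfk
            simp [hcb, PySem.Dict.getD_eq_get?_getD, hb, this]
          | none =>
            have hcb : db.contains k = false := by
              rw [PySem.Dict.contains_eq_isSome_get?, hb]; rfl
            rw [hb, Option.none_or] at hfk
            have hca : da.contains k = true := by
              rw [PySem.Dict.contains_eq_isSome_get?, hfk]; rfl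
            simp [hcb, hca, PySem.Dict.getD_eq_get?_getD, hfk]
        have hinv' : ∀ k' v', (d.insert k v).get? k' = some v' →
            (db.get? k').or (da.get? k') = some v' := by
          intro k' v' hv'
          rw [PySem.Dict.get?_insert] at hv'
          split at hv'
          · next heq =>
            subst heq
            have : v = v' := by injection hv'
            rw [hfk, this]
          · exact hinv k' v' hv'
        simp only [List.foldl_cons, hstep]
        rw [ih (d.insert k v) (PySem.Dict.nodup_keys_insert d k v hn) hinv']
        rw [PySem.Dict.items_insert_of_not_contains _ _ hcf]
        have hcont' : ∀ x, (!(d.insert k v).contains x) = ((x != k) && !d.contains x) := by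
          intro x
          rw [PySem.Dict.contains_insert]
          by_cases hx : x = k
          · subst hx; simp
          · simp [bne]
        have hfilter : rest.filter (fun x => !(d.insert k v).contains x)
            = (rest.filter (fun x => !d.contains x)).filter (fun x => x != k) := by
          rw [List.filter_filter]
          exact List.filter_congr (fun x _ => hcont' x)
        rw [hfilter, pv_firstOccs_filter]
        have h1 : (k :: rest).filter (fun x => !d.contains x)
            = k :: rest.filter (fun x => !d.contains x) := by
          rw [List.filter_cons, if_pos (by rw [hcf]; simp)]
        rw [h1]
        simp only [pvFirstOccs, List.filterMap_cons, hfk, Option.map_some]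
        simp [List.append_assoc]
      | none =>
        -- neither dict has k: the step does nothing, and k contributes nothing.
        have hcb : db.contains k = false := by
          rw [PySem.Dict.contains_eq_isSome_get?, (Option.or_eq_none_iff.mp hfk).1]; rfl
        have hca : da.contains k = false := by
          rw [PySem.Dict.contains_eq_isSome_get?, (Option.or_eq_none_iff.mp hfk).2]; rfl
        rw [List.foldl_cons, if_neg (by simp [hcb]), if_neg (by simp [hca])]
        rw [ih d hn hinv]
        congr 1
        have h1 : (k :: rest).filter (fun x => !d.contains x)
            = k :: rest.filter (fun x => !d.contains x) := by
          rw [List.filter_cons, if_pos (by rw [hcf]; simp)]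
        rw [h1]
        simp only [pvFirstOccs, List.filterMap_cons, hfk, Option.map_none]
        exact (pv_filterMap_filter_ne _ k (by rw [hfk]; rfl) _).symm

-- ===== B-side lemmas =====

-- The pos-building loop: first-wins insertion of enumerate indices.
theorem pv_pos_get (xs : List String) (s : Int) (d : PySem.Dict String Int) (k : String) :
    ((PySem.List.enumerate xs s).foldl
        (fun d p => if d.contains p.2 then d else d.insert p.2 p.1) d).get? k
    = (d.get? k).or (if k ∈ xs then some (s + (xs.idxOf k : Int)) else none) := by
  induction xs generalizing s d with
  | nil => simp [PySem.List.enumerate_nil]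
  | cons x rest ih =>
    rw [PySem.List.enumerate_cons]
    simp only [List.foldl_cons]
    by_cases hc : d.contains x = true
    · rw [if_pos hc, ih (s + 1) d]
      by_cases hk : k = x
      · subst hk
        obtain ⟨w, hw⟩ : ∃ w, d.get? k = some w := by
          have := PySem.Dict.contains_eq_isSome_get? d k
          rw [hc] at this
          exact Option.isSome_iff_exists.mp this.symm
        rw [hw]; rfl
      · simp only [List.mem_cons, hk, false_or, List.idxOf_cons_ne _ (Ne.symm hk)]
        congr 1
        by_cases hm : k ∈ rest
        · simp only [hm, if_pos]
          congr 1
          push_cast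
          ring
        · simp [hm]
    · rw [if_neg hc, ih (s + 1) (d.insert x s)]
      by_cases hk : k = x
      · subst hk
        have hgk : d.get? k = none := by
          have := PySem.Dict.contains_eq_isSome_get? d k
          simp only [hc] at this
          exact Option.not_isSome_iff_eq_none.mp (by rw [← this]; simp [hc])
        rw [PySem.Dict.get?_insert_self, hgk]
        simp [List.idxOf_cons_self]
      · rw [PySem.Dict.get?_insert_of_ne _ _ hk]
        simp only [List.mem_cons, hk, false_or, List.idxOf_cons_ne _ (Ne.symm hk)]
        congr 1
        by_cases hm : k ∈ rest
        · simp only [hm, if_pos]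
          congr 1
          push_cast
          ring
        · simp [hm]

-- The conditional-insert loop over a dict's items never disturbs an unmentioned key.
theorem pv_foldC_get_not_mem (c : String → Bool) (l : List (String × Int))
    (d : PySem.Dict String Int) (k : String) (h : k ∉ l.map Prod.fst) :
    (l.foldl (fun d p => if c p.1 then d.insert p.1 p.2 else d) d).get? k = d.get? k := by
  induction l generalizing d with
  | nil => rfl
  | cons p rest ih =>
    simp only [List.map_cons, List.mem_cons, not_or] at h
    simp only [List.foldl_cons]
    by_cases hp : c p.1 = true
    · rw [if_pos hp, ih _ h.2, PySem.Dict.get?_insert_of_ne _ _ h.1]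
    · rw [if_neg hp, ih _ h.2]

-- With distinct keys: the loop's lookup is (first match in l if c, else unchanged).
theorem pv_foldC_get (c : String → Bool) (l : List (String × Int))
    (hl : (l.map Prod.fst).Nodup) (d : PySem.Dict String Int) (k : String) :
    (l.foldl (fun d p => if c p.1 then d.insert p.1 p.2 else d) d).get? k
    = if c k then ((PySem.Dict.mk l).get? k).or (d.get? k) else d.get? k := by
  induction l generalizing d with
  | nil =>
    simp only [List.foldl_nil]
    split <;> simp [PySem.Dict.get?]
  | cons p rest ih =>
    simp only [List.map_cons, List.nodup_cons] at hl
    simp only [List.foldl_cons]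
    by_cases hk : p.1 = k
    · subst hk
      by_cases hck : c p.1 = true
      · rw [if_pos hck, pv_foldC_get_not_mem c rest _ _ hl.1, PySem.Dict.get?_insert_self,
          if_pos hck, PySem.Dict.get?_mk_cons]
        simp
      · rw [if_neg hck, ih hl.2 d, if_neg hck, if_neg hck]
    · by_cases hcp : c p.1 = true
      · rw [if_pos hcp, ih hl.2 (d.insert p.1 p.2),
          PySem.Dict.get?_insert_of_ne _ _ (fun h => hk h.symm), PySem.Dict.get?_mk_cons]
        simp [hk]
      · rw [if_neg hcp, ih hl.2 d, PySem.Dict.get?_mk_cons]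
        simp [hk]

theorem pv_foldC_nodup (c : String → Bool) (l : List (String × Int))
    (d : PySem.Dict String Int) (h : d.keys.Nodup) :
    (l.foldl (fun d p => if c p.1 then d.insert p.1 p.2 else d) d).keys.Nodup := by
  induction l generalizing d with
  | nil => exact h
  | cons p rest ih =>
    simp only [List.foldl_cons]
    by_cases hp : c p.1 = true
    · rw [if_pos hp]; exact ih _ (PySem.Dict.nodup_keys_insert _ _ _ h)
    · rw [if_neg hp]; exact ih _ h

-- Keys of the reference list are distinct.
theorem pv_ref_keys_nodup (f : String → Option Int) (l : List String) (h : l.Nodup) :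
    ((l.filterMap (fun k => (f k).map (fun v => (k, v)))).map Prod.fst).Nodup := by
  induction l with
  | nil => simp
  | cons k rest ih =>
    rcases List.nodup_cons.mp h with ⟨hk, hrest⟩
    cases hf : f k with
    | none => simpa [List.filterMap_cons, hf] using ih hrest
    | some v =>
      simp only [List.filterMap_cons, hf, Option.map_some, List.map_cons]
      refine List.Nodup.cons ?_ (ih hrest)
      intro hmem
      rcases List.mem_map.mp hmem with ⟨p, hp, hpk⟩
      rcases List.mem_filterMap.mp hp with ⟨x, hx, hfx⟩
      cases hfx' : f x with
      | none => rw [hfx'] at hfx; simp at hfx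
      | some w =>
        rw [hfx'] at hfx
        simp only [Option.map_some, Option.some.injEq] at hfx
        apply hk
        rw [← hfx] at hpk
        simpa [← hpk] using hx

-- ===== assembly =====

theorem pv_A_eq_ref (a b : List (String × Int)) (all_keys : List String) :
    merge_prefer_right a b all_keys = pvRef a b all_keys := by
  unfold merge_prefer_right pvRef
  rw [pv_foldA (PySem.Dict.mk a) (PySem.Dict.mk b) all_keys PySem.Dict.empty
      PySem.Dict.nodup_keys_empty (by intro k v h; rw [PySem.Dict.get?_empty] at h; cases h)]
  simp [PySem.Dict.empty]

theorem pv_B_eq_ref (a b : List (String × Int)) (all_keys : List String)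
    (ha : (a.map Prod.fst).Nodup) (hb : (b.map Prod.fst).Nodup) :
    merge_prefer_right_alt a b all_keys = pvRef a b all_keys := by
  unfold merge_prefer_right_alt
  simp only []
  set f : String → Option Int :=
    fun k => ((PySem.Dict.mk b).get? k).or ((PySem.Dict.mk a).get? k) with hf
  set pos : PySem.Dict String Int :=
    (PySem.List.enumerate all_keys 0).foldl
      (fun d p => if d.contains p.2 then d else d.insert p.2 p.1) PySem.Dict.empty with hpos
  set cand1 : PySem.Dict String Int :=
    a.foldl (fun d p => if pos.contains p.1 then d.insert p.1 p.2 else d) PySem.Dict.empty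
    with hcand1
  set cand : PySem.Dict String Int :=
    b.foldl (fun d p => if pos.contains p.1 then d.insert p.1 p.2 else d) cand1 with hcand
  -- pos's lookup is the first-occurrence index
  have hposget : ∀ k, pos.get? k
      = (if k ∈ all_keys then some ((all_keys.idxOf k : Int)) else none) := by
    intro k
    rw [hpos, pv_pos_get all_keys 0 PySem.Dict.empty k, PySem.Dict.get?_empty, Option.none_or]
    split <;> simp
  have hposcont : ∀ k, pos.contains k = decide (k ∈ all_keys) := by
    intro k
    rw [PySem.Dict.contains_eq_isSome_get?, hposget k]
    by_cases hm : k ∈ all_keys <;> simp [hm]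
  -- cand's lookup
  have hcandget : ∀ k, cand.get? k = if k ∈ all_keys then f k else none := by
    intro k
    rw [hcand, pv_foldC_get _ b hb, hcand1, pv_foldC_get _ a ha, PySem.Dict.get?_empty]
    rw [hposcont k]
    by_cases hm : k ∈ all_keys <;> simp [hm, hf]
  have hcandnodup : cand.keys.Nodup := by
    rw [hcand, hcand1]
    exact pv_foldC_nodup _ b _ (pv_foldC_nodup _ a _ PySem.Dict.nodup_keys_empty)
  -- the reference list
  have hrefdef : pvRef a b all_keys
      = (pvFirstOccs all_keys).filterMap (fun k => (f k).map (fun v => (k, v))) := rfl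
  have hrefkeys : ((pvRef a b all_keys).map Prod.fst).Nodup := by
    rw [hrefdef]
    exact pv_ref_keys_nodup f (pvFirstOccs all_keys) (pv_nodup_firstOccs all_keys)
  have hrefnodup : (pvRef a b all_keys).Nodup := List.Nodup.of_map _ hrefkeys
  have hmemref : ∀ p : String × Int,
      p ∈ pvRef a b all_keys ↔ p.1 ∈ all_keys ∧ f p.1 = some p.2 := by
    intro p
    rw [hrefdef, List.mem_filterMap]
    constructor
    · rintro ⟨k, hk, hfk⟩
      cases hfk' : f k with
      | none => rw [hfk'] at hfk; cases hfk
      | some v =>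
        rw [hfk'] at hfk
        simp only [Option.map_some, Option.some.injEq] at hfk
        subst hfk
        exact ⟨(pv_mem_firstOccs k all_keys).mp hk, hfk'⟩
    · rintro ⟨hmem, hfp⟩
      exact ⟨p.1, (pv_mem_firstOccs p.1 all_keys).mpr hmem, by rw [hfp]; simp⟩
  -- cand.items is a permutation of the reference list
  have hmemcand : ∀ p : String × Int,
      p ∈ cand.items ↔ p.1 ∈ all_keys ∧ f p.1 = some p.2 := by
    intro p
    rw [← PySem.Dict.get?_eq_some_iff_mem_items cand p.1 p.2 hcandnodup, hcandget p.1]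
    by_cases hm : p.1 ∈ all_keys <;> simp [hm]
  have hcanditemsnodup : cand.items.Nodup := by
    have : cand.items.map Prod.fst = cand.keys := rfl
    exact List.Nodup.of_map Prod.fst (by rw [this]; exact hcandnodup)
  have hperm : (pvRef a b all_keys).Perm cand.items := by
    rw [List.perm_ext_iff_of_nodup hrefnodup hcanditemsnodup]
    intro p
    rw [hmemref p, hmemcand p]
  -- the reference list is strictly increasing in pos
  have hpairwise : (pvRef a b all_keys).Pairwise
      (fun p q => pos.getD p.1 0 < pos.getD q.1 0) := by
    rw [hrefdef]
    apply List.pairwise_filterMap.mpr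
    refine (pv_firstOccs_pairwise all_keys).imp_of_mem ?_
    intro x y hx hy hlt p hp q hq
    have hxm : x ∈ all_keys := (pv_mem_firstOccs x all_keys).mp hx
    have hym : y ∈ all_keys := (pv_mem_firstOccs y all_keys).mp hy
    obtain ⟨v, hv, rfl⟩ : ∃ v, f x = some v ∧ p = (x, v) := by
      cases hfx : f x with
      | none => rw [hfx] at hp; cases hp
      | some v =>
        rw [hfx] at hp
        simp only [Option.map_some, Option.some.injEq] at hp
        exact ⟨v, rfl, hp.symm⟩
    obtain ⟨w, hw, rfl⟩ : ∃ w, f y = some w ∧ q = (y, w) := by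
      cases hfy : f y with
      | none => rw [hfy] at hq; cases hq
      | some w =>
        rw [hfy] at hq
        simp only [Option.map_some, Option.some.injEq] at hq
        exact ⟨w, rfl, hq.symm⟩
    simp only [PySem.Dict.getD_eq_get?_getD, hposget, hxm, hym, if_pos]
    simpa using hlt
  -- sorting cand.items by pos yields exactly the reference list
  have hsorted : PySem.List.sorted cand.items (fun kv => pos.getD kv.1 0)
      = pvRef a b all_keys :=
    PySem.List.sorted_eq_of_perm_of_pairwise_lt _ _ _ hperm hpairwise
  rw [hsorted]
  -- dict(…) of a list with distinct keys lists exactly those pairs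
  show (PySem.Dict.ofList (pvRef a b all_keys)).items = pvRef a b all_keys
  unfold PySem.Dict.ofList PySem.Dict.update
  rw [PySem.Dict.items_foldl_insert_fresh (pvRef a b all_keys) Prod.fst Prod.snd
      PySem.Dict.empty (fun p _ => PySem.Dict.contains_empty p.1) hrefkeys]
  simp [PySem.Dict.empty]

-- ===== VERDICT (by name: the statement is the Claim_ definition above) =====
theorem merge_prefer_right_spec : Claim_equal_merge_prefer_right := by
  unfold Claim_equal_merge_prefer_right
  intro a b all_keys _ hpre
  unfold Spec_merge_prefer_right
  rw [pv_A_eq_ref, pv_B_eq_ref a b all_keys hpre.1 hpre.2]
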